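-- pv_equiv track=rewrite | github.com/rolfedh/scripts-for-mod-docs | asciidoc_fix_tool.py | get_doc_type
-- ===== SOURCE A (Python) =====
-- def get_doc_type(filename):
--     prefix_map = {
--         "proc": "PROCEDURE",
--         "con": "CONCEPT",
--         "ref": "REFERENCE",
--         "assembly": "ASSEMBLY"
--     }
--     for prefix, doc_type in prefix_map.items():
--         if filename.startswith(f"{prefix}_") or filename.startswith(f"{prefix}-"):
--             return doc_type
--     return None
-- ===== SOURCE B (Python) =====
-- def get_doc_type(filename):
--     prefix_map = {
--         "proc": "PROCEDURE",
--         "con": "CONCEPT",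
--         "ref": "REFERENCE",
--         "assembly": "ASSEMBLY"
--     }
--     u = filename.find("_")
--     h = filename.find("-")
--     if u == -1 and h == -1:
--         return None
--     if u == -1:
--         idx = h
--     elif h == -1:
--         idx = u
--     else:
--         idx = min(u, h)
--     return prefix_map.get(filename[:idx])
-- ===== Notes on version B (the rewrite author's own statement) =====
-- stated objective: idiomatic
-- what changed: Instead of scanning the prefix map and testing startswith for each entry, B cuts the filename at its earliest '_'/'-' separator (str.find) and does a single dict lookup of that prefix.
import Mathlib
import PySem

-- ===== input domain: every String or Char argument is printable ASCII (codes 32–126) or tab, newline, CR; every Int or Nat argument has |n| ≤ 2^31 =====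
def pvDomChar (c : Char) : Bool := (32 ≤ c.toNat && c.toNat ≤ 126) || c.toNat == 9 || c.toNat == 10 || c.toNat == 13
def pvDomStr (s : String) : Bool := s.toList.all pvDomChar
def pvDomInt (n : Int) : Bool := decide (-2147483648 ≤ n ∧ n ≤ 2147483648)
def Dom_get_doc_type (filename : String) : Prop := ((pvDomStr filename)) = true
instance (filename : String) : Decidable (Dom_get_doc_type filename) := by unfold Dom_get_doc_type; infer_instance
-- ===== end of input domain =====

-- B replaces A's linear scan over the prefix map (startswith per entry) by cutting the filename
-- at its first '_'/'-' separator and doing one dictionary lookup of that prefix (idiomatic).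


-- ===== PORT A =====
-- A's prefix_map, iterated in insertion order
def pvPrefixMapA : List (List Char × String) :=
  [(['p','r','o','c'], "PROCEDURE"), (['c','o','n'], "CONCEPT"),
   (['r','e','f'], "REFERENCE"), (['a','s','s','e','m','b','l','y'], "ASSEMBLY")]

-- the for-loop over prefix_map.items() with early return
def pvLoopA : List (List Char × String) → List Char → Option String
  | [], _ => none
  | (p, t) :: rest, s =>
    if PySem.Chars.startswith s (p ++ ['_']) || PySem.Chars.startswith s (p ++ ['-'])
    then some t else pvLoopA rest s

def get_doc_type (filename : String) : Option String :=
  pvLoopA pvPrefixMapA filename.toList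

-- ===== PORT B =====
def pvPrefixMapB : PySem.Dict (List Char) String :=
  PySem.Dict.ofList
    [(['p','r','o','c'], "PROCEDURE"), (['c','o','n'], "CONCEPT"),
     (['r','e','f'], "REFERENCE"), (['a','s','s','e','m','b','l','y'], "ASSEMBLY")]

def get_doc_type_alt (filename : String) : Option String :=
  let u := PySem.Str.find filename "_"
  let h := PySem.Str.find filename "-"
  if u = -1 ∧ h = -1 then none
  else
    let idx := if u = -1 then h else if h = -1 then u else min u h
    PySem.Dict.get? pvPrefixMapB (PySem.Chars.slice filename.toList none (some idx))

-- ===== PRECONDITION & SPEC =====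
def Spec_get_doc_type (filename : String) (out : Option String) : Prop := out = get_doc_type_alt filename
instance (filename : String) (out : Option String) : Decidable (Spec_get_doc_type filename out) := by unfold Spec_get_doc_type; infer_instance

-- ===== CLAIM (what is proved, stated in full; the proofs are below) =====
def Claim_equal_get_doc_type : Prop := ∀ (filename : String), Dom_get_doc_type filename → Spec_get_doc_type filename (get_doc_type filename)

-- ===== LEMMAS AND PROOFS =====

-- the separator test both programs are driven by
def pvIsSep (c : Char) : Bool := c == '_' || c == '-'

-- the common reading of both programs: cut at the first separator, look the prefix up
def pvCut (l : List Char) : Option String :=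
  let k := l.findIdx pvIsSep
  if k = l.length then none else PySem.Dict.get? pvPrefixMapB (l.take k)

theorem pvPrefixSingleDrop (l : List Char) (c : Char) (k : Nat) :
    [c] <+: l.drop k ↔ l[k]? = some c := by
  rw [← List.head?_drop]
  constructor
  · rintro ⟨t, ht⟩
    rw [← ht]; rfl
  · intro h
    cases hd : l.drop k with
    | nil => simp [hd] at h
    | cons a t =>
      simp [hd] at h
      exact ⟨t, by simp [h]⟩

-- single-character find is List.findIdx (with -1 when absent)
theorem pvFindSingle (l : List Char) (c : Char) :
    PySem.Chars.find l [c] =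
      (if c ∈ l then ((l.findIdx (fun x => x == c) : Nat) : Int) else -1) := by
  by_cases hc : c ∈ l
  · rw [if_pos hc]
    have hne : PySem.Chars.find l [c] ≠ -1 := by
      rw [Ne, PySem.Chars.find_eq_neg_one_iff]
      exact fun h => h ((List.singleton_infix_iff c l).mpr hc)
    have hnn : 0 ≤ PySem.Chars.find l [c] := by
      have := PySem.Chars.neg_one_le_find l [c]
      omega
    obtain ⟨hpre, hmin⟩ := PySem.Chars.find_spec hnn
    set N := (PySem.Chars.find l [c]).toNat with hN
    obtain ⟨hNl, hNc⟩ := List.getElem?_eq_some_iff.mp ((pvPrefixSingleDrop l c N).mp hpre)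
    have hfi : List.findIdx (fun x => x == c) l < l.length :=
      List.findIdx_lt_length.mpr ⟨c, hc, by simp⟩
    have hle : List.findIdx (fun x => x == c) l ≤ N := by
      by_contra hlt
      push Not at hlt
      have := List.not_of_lt_findIdx hlt
      simp at this
      exact this hNc
    have hge : N ≤ List.findIdx (fun x => x == c) l := by
      by_contra hlt
      push Not at hlt
      refine hmin _ hlt ((pvPrefixSingleDrop l c _).mpr ?_)
      rw [List.getElem?_eq_getElem hfi]
      have := List.findIdx_getElem (p := fun x => x == c) (xs := l) (w := hfi)
      simpa using this
    have hv : PySem.Chars.find l [c] = (N : Int) := (Int.toNat_of_nonneg hnn).symm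
    omega
  · rw [if_neg hc, PySem.Chars.find_eq_neg_one_iff]
    exact fun h => hc ((List.singleton_infix_iff c l).mp h)

-- B computes pvCut
theorem pvBEqCut (s : String) : get_doc_type_alt s = pvCut s.toList := by
  unfold get_doc_type_alt pvCut
  simp only [PySem.Str.find_eq]
  have hu : ("_" : String).toList = ['_'] := rfl
  have hh : ("-" : String).toList = ['-'] := rfl
  rw [hu, hh, pvFindSingle, pvFindSingle]
  set l := s.toList with hl
  have hmin : min (l.findIdx (fun x => x == '_')) (l.findIdx (fun x => x == '-')) = l.findIdx pvIsSep :=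
    List.min_findIdx_findIdx
  by_cases h1 : '_' ∈ l <;> by_cases h2 : '-' ∈ l
  · -- both present
    have f1 : l.findIdx (fun x => x == '_') < l.length := List.findIdx_lt_length.mpr ⟨_, h1, by simp⟩
    have f2 : l.findIdx (fun x => x == '-') < l.length := List.findIdx_lt_length.mpr ⟨_, h2, by simp⟩
    rw [if_pos h1, if_pos h2]
    rw [if_neg (by omega : ¬((l.findIdx (fun x => x == '_') : Int) = -1 ∧ (l.findIdx (fun x => x == '-') : Int) = -1))]
    rw [if_neg (by omega : ¬((l.findIdx (fun x => x == '_') : Int) = -1)),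
        if_neg (by omega : ¬((l.findIdx (fun x => x == '-') : Int) = -1))]
    rw [← Nat.cast_min, PySem.Chars.slice_eq_listSlice, PySem.List.slice_to_natCast, hmin]
    rw [if_neg (by omega : ¬(l.findIdx pvIsSep = l.length))]
  · -- only '_'
    have f1 : l.findIdx (fun x => x == '_') < l.length := List.findIdx_lt_length.mpr ⟨_, h1, by simp⟩
    have f2 : l.findIdx (fun x => x == '-') = l.length :=
      List.findIdx_eq_length.mpr (fun x hx => by simp; rintro rfl; exact h2 hx)
    rw [if_pos h1, if_neg h2]
    rw [if_neg (by omega : ¬((l.findIdx (fun x => x == '_') : Int) = -1 ∧ (-1 : Int) = -1))]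
    rw [if_neg (by omega : ¬((l.findIdx (fun x => x == '_') : Int) = -1)), if_pos rfl]
    rw [PySem.Chars.slice_eq_listSlice, PySem.List.slice_to_natCast]
    have hk : l.findIdx pvIsSep = l.findIdx (fun x => x == '_') := by omega
    rw [hk, if_neg (by omega : ¬(l.findIdx (fun x => x == '_') = l.length))]
  · -- only '-'
    have f2 : l.findIdx (fun x => x == '-') < l.length := List.findIdx_lt_length.mpr ⟨_, h2, by simp⟩
    have f1 : l.findIdx (fun x => x == '_') = l.length :=
      List.findIdx_eq_length.mpr (fun x hx => by simp; rintro rfl; exact h1 hx)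
    rw [if_neg h1, if_pos h2]
    rw [if_neg (by omega : ¬((-1 : Int) = -1 ∧ (l.findIdx (fun x => x == '-') : Int) = -1))]
    rw [if_pos rfl]
    rw [PySem.Chars.slice_eq_listSlice, PySem.List.slice_to_natCast]
    have hk : l.findIdx pvIsSep = l.findIdx (fun x => x == '-') := by omega
    rw [hk, if_neg (by omega : ¬(l.findIdx (fun x => x == '-') = l.length))]
  · -- neither
    rw [if_neg h1, if_neg h2, if_pos ⟨rfl, rfl⟩]
    have f1 : l.findIdx (fun x => x == '_') = l.length :=
      List.findIdx_eq_length.mpr (fun x hx => by simp; rintro rfl; exact h1 hx)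
    have f2 : l.findIdx (fun x => x == '-') = l.length :=
      List.findIdx_eq_length.mpr (fun x hx => by simp; rintro rfl; exact h2 hx)
    rw [if_pos (by omega : l.findIdx pvIsSep = l.length)]

-- B's dictionary lookup, written out as the four-way case split the proofs below branch on
theorem pvGetB (key : List Char) :
    pvPrefixMapB.get? key =
      if key = ['p','r','o','c'] then some "PROCEDURE"
      else if key = ['c','o','n'] then some "CONCEPT"
      else if key = ['r','e','f'] then some "REFERENCE"
      else if key = ['a','s','s','e','m','b','l','y'] then some "ASSEMBLY"
      else none := by
  split_ifs with h1 h2 h3 h4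
  · subst h1; decide
  · subst h2; decide
  · subst h3; decide
  · subst h4; decide
  · rw [show pvPrefixMapB = PySem.Dict.mk
      [(['p','r','o','c'], "PROCEDURE"), (['c','o','n'], "CONCEPT"),
       (['r','e','f'], "REFERENCE"), (['a','s','s','e','m','b','l','y'], "ASSEMBLY")] from rfl]
    simp [PySem.Dict.get?]
    refine ⟨fun e => h1 e.symm, fun e => h2 e.symm, fun e => h3 e.symm, fun e => h4 e.symm⟩

-- a prefix ending in a separator cannot start a separator-free string
theorem pvSwFalse (l p : List Char) (s : Char)
    (hl : ∀ x ∈ l, pvIsSep x = false) (hs : pvIsSep s = true) :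
    PySem.Chars.startswith l (p ++ [s]) = false := by
  rw [Bool.eq_false_iff, Ne, PySem.Chars.startswith_iff]
  intro h
  have : s ∈ l := h.subset (by simp)
  rw [hl s this] at hs
  exact absurd hs (by simp)

-- with the first separator of l at k, startswith l (p ++ [sep]) says: l cut at k is p, and l[k] is that sep
theorem pvSwIff (l p : List Char) (s : Char) (k : Nat)
    (hp : ∀ x ∈ p, pvIsSep x = false) (hs : pvIsSep s = true)
    (hk : k < l.length) (hkv : l.findIdx pvIsSep = k) :
    (PySem.Chars.startswith l (p ++ [s]) = true ↔ (l.take k = p ∧ l[k] = s)) := by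
  rw [PySem.Chars.startswith_iff]
  constructor
  · rintro ⟨t, ht⟩
    have hlp : l = p ++ s :: t := by rw [← ht]; simp
    have hfp : p.findIdx pvIsSep = p.length := List.findIdx_eq_length.mpr hp
    have hks : l.findIdx pvIsSep = p.length := by
      rw [hlp, List.findIdx_append, hfp, if_neg (by omega)]
      simp [List.findIdx_cons, hs]
    have hkp : k = p.length := by omega
    subst hkp
    refine ⟨by rw [hlp, List.take_left' rfl], ?_⟩
    have : l[p.length]'hk = (p ++ s :: t)[p.length]'(by rw [← hlp]; exact hk) := by
      congr 1
    rw [this, List.getElem_append_right (by omega)]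
    simp
  · rintro ⟨h1, h2⟩
    refine ⟨l.drop (k+1), ?_⟩
    rw [← h1, ← h2]
    simp

-- an entry of A's loop fires exactly when the prefix cut at the first separator is its key
theorem pvEntryIff (l p : List Char) (k : Nat)
    (hp : ∀ x ∈ p, pvIsSep x = false)
    (hk : k < l.length) (hkv : l.findIdx pvIsSep = k) :
    ((PySem.Chars.startswith l (p ++ ['_']) || PySem.Chars.startswith l (p ++ ['-'])) = true
      ↔ l.take k = p) := by
  have hsep : pvIsSep (l[k]'hk) = true := by
    have := List.findIdx_getElem (p := pvIsSep) (xs := l) (w := by omega)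
    simpa [hkv] using this
  rw [Bool.or_eq_true,
      pvSwIff l p '_' k hp (by decide) hk hkv,
      pvSwIff l p '-' k hp (by decide) hk hkv]
  constructor
  · rintro (⟨h, _⟩ | ⟨h, _⟩) <;> exact h
  · intro h
    rcases (by simpa [pvIsSep] using hsep : l[k]'hk = '_' ∨ l[k]'hk = '-') with h2 | h2
    · exact Or.inl ⟨h, h2⟩
    · exact Or.inr ⟨h, h2⟩

-- A computes pvCut
theorem pvAEqCut (l : List Char) : pvLoopA pvPrefixMapA l = pvCut l := by
  unfold pvCut
  by_cases hk : l.findIdx pvIsSep = l.length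
  · rw [if_pos hk]
    have hall : ∀ x ∈ l, pvIsSep x = false := List.findIdx_eq_length.mp hk
    have hU : ∀ p, PySem.Chars.startswith l (p ++ ['_']) = false :=
      fun p => pvSwFalse l p '_' hall rfl
    have hH : ∀ p, PySem.Chars.startswith l (p ++ ['-']) = false :=
      fun p => pvSwFalse l p '-' hall rfl
    have u1 := hU ['p','r','o','c']; have u2 := hU ['c','o','n']
    have u3 := hU ['r','e','f']; have u4 := hU ['a','s','s','e','m','b','l','y']
    have v1 := hH ['p','r','o','c']; have v2 := hH ['c','o','n']
    have v3 := hH ['r','e','f']; have v4 := hH ['a','s','s','e','m','b','l','y']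
    simp only [List.cons_append, List.nil_append] at u1 u2 u3 u4 v1 v2 v3 v4
    simp [pvLoopA, pvPrefixMapA, u1, u2, u3, u4, v1, v2, v3, v4]
  · rw [if_neg hk]
    have hkl : l.findIdx pvIsSep < l.length :=
      lt_of_le_of_ne List.findIdx_le_length hk
    have e1 := pvEntryIff l ['p','r','o','c'] _ (by intro x hx; fin_cases hx <;> rfl) hkl rfl
    have e2 := pvEntryIff l ['c','o','n'] _ (by intro x hx; fin_cases hx <;> rfl) hkl rfl
    have e3 := pvEntryIff l ['r','e','f'] _ (by intro x hx; fin_cases hx <;> rfl) hkl rfl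
    have e4 := pvEntryIff l ['a','s','s','e','m','b','l','y'] _ (by intro x hx; fin_cases hx <;> rfl) hkl rfl
    simp only [List.cons_append, List.nil_append, Bool.or_eq_true] at e1 e2 e3 e4
    rw [pvGetB]
    simp only [pvLoopA, pvPrefixMapA]
    by_cases h1 : l.take (l.findIdx pvIsSep) = ['p','r','o','c'] <;>
    by_cases h2 : l.take (l.findIdx pvIsSep) = ['c','o','n'] <;>
    by_cases h3 : l.take (l.findIdx pvIsSep) = ['r','e','f'] <;>
    by_cases h4 : l.take (l.findIdx pvIsSep) = ['a','s','s','e','m','b','l','y'] <;>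
      simp_all

-- ===== VERDICT (by name: the statement is the Claim_ definition above) =====
theorem get_doc_type_spec : Claim_equal_get_doc_type := by
  intro filename _
  unfold Spec_get_doc_type get_doc_type
  rw [pvAEqCut, pvBEqCut]
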